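-- pv_equiv track=rewrite | github.com/FelixFelicis555/6-Sem | dm/test3/lab1_apriori_test.py | get_c1
-- ===== SOURCE A (Python) =====
-- def get_c1(dataset):
--     list_of_items = []
--     for i in dataset:
--         for j in i:
--             if j not in list_of_items:
--                 list_of_items.append(j)
--     list_of_items.sort()
--     return list_of_items
-- ===== SOURCE B (Python) =====
-- def get_c1(dataset):
--     all_items = []
--     for t in dataset:
--         all_items.extend(t)
--     all_items.sort()
--     out = []
--     for x in all_items:
--         if not out or out[-1] != x:
--             out.append(x)
--     return out
-- ===== Notes on version B (the rewrite author's own statement) =====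
-- stated objective: faster
-- what changed: A dedups with a per-element membership scan over the growing unique list and sorts afterwards; B flattens everything, sorts once, then removes consecutive duplicates in a single adjacency scan.
import Mathlib
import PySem

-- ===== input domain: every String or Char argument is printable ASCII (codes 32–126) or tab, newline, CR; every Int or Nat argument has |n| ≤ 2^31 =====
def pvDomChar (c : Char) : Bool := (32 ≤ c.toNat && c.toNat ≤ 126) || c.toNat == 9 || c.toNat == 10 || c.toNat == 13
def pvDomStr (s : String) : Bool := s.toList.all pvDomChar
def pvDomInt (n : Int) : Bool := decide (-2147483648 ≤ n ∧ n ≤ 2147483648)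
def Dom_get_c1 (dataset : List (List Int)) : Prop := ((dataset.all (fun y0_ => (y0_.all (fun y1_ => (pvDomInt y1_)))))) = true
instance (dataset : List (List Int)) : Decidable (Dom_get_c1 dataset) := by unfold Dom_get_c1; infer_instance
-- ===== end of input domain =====

-- B flattens all transactions, sorts once, then removes consecutive duplicates by adjacency,
-- instead of A's quadratic membership-test dedup followed by a sort; same return value, measured faster.

-- ===== PORT A =====
-- inner 'for j in i: if j not in list_of_items: list_of_items.append(j)'
def pvAInner (acc : List Int) (row : List Int) : List Int :=
  row.foldl (fun acc j => if j ∈ acc then acc else acc ++ [j]) acc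

def get_c1 (dataset : List (List Int)) : List Int :=
  let list_of_items := dataset.foldl (fun acc i => pvAInner acc i) []
  PySem.List.sorted list_of_items (fun x => x) false

-- ===== PORT B =====
def get_c1_alt (dataset : List (List Int)) : List Int :=
  let all_items := dataset.foldl (fun acc t => acc ++ t) []
  let sorted_items := PySem.List.sorted all_items (fun x => x) false
  sorted_items.foldl (fun out x => if out = [] ∨ out.getLast? ≠ some x then out ++ [x] else out) []

-- ===== PRECONDITION & SPEC =====
def Spec_get_c1 (dataset : List (List Int)) (out : List Int) : Prop := out = get_c1_alt dataset
instance (dataset : List (List Int)) (out : List Int) : Decidable (Spec_get_c1 dataset out) := by unfold Spec_get_c1; infer_instance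

-- ===== CLAIM (what is proved, stated in full; the proofs are below) =====
def Claim_equal_get_c1 : Prop := ∀ (dataset : List (List Int)), Dom_get_c1 dataset → Spec_get_c1 dataset (get_c1 dataset)

-- ===== LEMMAS AND PROOFS =====

-- A's dedup loop: membership and nodup invariant
theorem pvAInner_mem (row : List Int) (acc : List Int) (y : Int) :
    y ∈ pvAInner acc row ↔ y ∈ acc ∨ y ∈ row := by
  induction row generalizing acc with
  | nil => simp [pvAInner]
  | cons x xs ih =>
    simp only [pvAInner, List.foldl_cons] at *
    by_cases hx : x ∈ acc
    · rw [if_pos hx, ih]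
      constructor
      · rintro (h | h)
        · exact Or.inl h
        · exact Or.inr (List.mem_cons_of_mem _ h)
      · rintro (h | h)
        · exact Or.inl h
        · rcases List.mem_cons.mp h with rfl | h
          · exact Or.inl hx
          · exact Or.inr h
    · rw [if_neg hx, ih]
      simp only [List.mem_append, List.mem_cons]
      tauto

theorem pvAInner_nodup (row : List Int) (acc : List Int) (h : acc.Nodup) :
    (pvAInner acc row).Nodup := by
  induction row generalizing acc with
  | nil => simpa [pvAInner]
  | cons x xs ih =>
    simp only [pvAInner, List.foldl_cons] at *
    by_cases hx : x ∈ acc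
    · rw [if_pos hx]; exact ih acc h
    · rw [if_neg hx]
      refine ih _ ?_
      simp only [List.nodup_append, List.nodup_singleton, h, true_and]
      intro a ha b hb
      rw [List.mem_singleton] at hb
      subst hb
      exact fun he => hx (he ▸ ha)

theorem pvALoop_mem (dataset : List (List Int)) (acc : List Int) (y : Int) :
    y ∈ dataset.foldl (fun acc i => pvAInner acc i) acc ↔
      y ∈ acc ∨ ∃ row ∈ dataset, y ∈ row := by
  induction dataset generalizing acc with
  | nil => simp
  | cons r rs ih =>
    simp only [List.foldl_cons, ih, pvAInner_mem]
    simp only [List.mem_cons]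
    constructor
    · rintro ((h | h) | ⟨row, hr, hy⟩)
      · exact Or.inl h
      · exact Or.inr ⟨r, Or.inl rfl, h⟩
      · exact Or.inr ⟨row, Or.inr hr, hy⟩
    · rintro (h | ⟨row, (rfl | hr), hy⟩)
      · exact Or.inl (Or.inl h)
      · exact Or.inl (Or.inr hy)
      · exact Or.inr ⟨row, hr, hy⟩

theorem pvALoop_nodup (dataset : List (List Int)) (acc : List Int) (h : acc.Nodup) :
    (dataset.foldl (fun acc i => pvAInner acc i) acc).Nodup := by
  induction dataset generalizing acc with
  | nil => simpa
  | cons r rs ih => exact ih _ (pvAInner_nodup r acc h)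

-- flatten lemma for B's extend loop
theorem pvFlatten (dataset : List (List Int)) (acc : List Int) :
    dataset.foldl (fun acc t => acc ++ t) acc = acc ++ dataset.flatten := by
  induction dataset generalizing acc with
  | nil => simp
  | cons r rs ih => simp [ih, List.append_assoc]

-- adjacency dedup, recursion form (proof helper only)
def pvG (prev : Int) : List Int → List Int
  | [] => []
  | x :: xs => if x = prev then pvG prev xs else x :: pvG x xs

theorem pvFoldl_dedup (xs : List Int) (acc : List Int) (prev : Int)
    (hne : acc ≠ []) (hl : acc.getLast? = some prev) :
    xs.foldl (fun out x => if out = [] ∨ out.getLast? ≠ some x then out ++ [x] else out) acc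
      = acc ++ pvG prev xs := by
  induction xs generalizing acc prev with
  | nil => simp [pvG]
  | cons x xs ih =>
    simp only [List.foldl_cons, pvG]
    by_cases hx : x = prev
    · subst hx
      rw [if_neg (by simp [hne, hl]), if_pos rfl]
      exact ih acc x hne hl
    · rw [if_pos (by simp [hl, Ne.symm hx]), if_neg hx,
        ih (acc ++ [x]) x (by simp) (by simp)]
      simp

theorem pvG_spec (xs : List Int) (prev : Int)
    (hp : xs.Pairwise (· ≤ ·)) (hle : ∀ y ∈ xs, prev ≤ y) :
    (pvG prev xs).Pairwise (· < ·) ∧ (∀ y, y ∈ pvG prev xs ↔ y ∈ xs ∧ y ≠ prev) := by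
  induction xs generalizing prev with
  | nil => simp [pvG]
  | cons x xs ih =>
    rw [List.pairwise_cons] at hp
    by_cases hx : x = prev
    · subst hx
      have := ih x hp.2 hp.1
      rw [show pvG x (x :: xs) = pvG x xs from by simp [pvG]]
      refine ⟨this.1, fun y => ?_⟩
      rw [this.2]
      constructor
      · rintro ⟨hy, hne⟩; exact ⟨List.mem_cons_of_mem _ hy, hne⟩
      · rintro ⟨hy, hne⟩
        rcases List.mem_cons.mp hy with rfl | hy
        · exact absurd rfl hne
        · exact ⟨hy, hne⟩
    · have hpx : prev < x := lt_of_le_of_ne (hle x (List.mem_cons_self)) (Ne.symm hx)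
      have := ih x hp.2 hp.1
      rw [show pvG prev (x :: xs) = x :: pvG x xs from by simp [pvG, hx]]
      constructor
      · rw [List.pairwise_cons]
        refine ⟨fun y hy => ?_, this.1⟩
        have := (this.2 y).mp hy
        exact lt_of_le_of_ne (hp.1 y this.1) (Ne.symm this.2)
      · intro y
        rw [List.mem_cons, this.2]
        constructor
        · rintro (rfl | ⟨hy, hne⟩)
          · exact ⟨List.mem_cons_self, Ne.symm (ne_of_lt hpx)⟩
          · refine ⟨List.mem_cons_of_mem _ hy, ?_⟩
            intro h; subst h
            exact absurd rfl (Ne.symm (ne_of_lt (lt_of_lt_of_le hpx (hp.1 y hy))))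
        · rintro ⟨hy, hne⟩
          rcases List.mem_cons.mp hy with rfl | hy
          · exact Or.inl rfl
          · by_cases hyx : y = x
            · exact Or.inl hyx
            · exact Or.inr ⟨hy, hyx⟩

-- B's result on the sorted flat list: strictly increasing, same members
theorem pvB_spec (s : List Int) (hp : s.Pairwise (· ≤ ·)) :
    (s.foldl (fun out x => if out = [] ∨ out.getLast? ≠ some x then out ++ [x] else out)
      []).Pairwise (· < ·) ∧
    (∀ y, y ∈ s.foldl (fun out x => if out = [] ∨ out.getLast? ≠ some x then out ++ [x] else out)
      [] ↔ y ∈ s) := by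
  cases s with
  | nil => simp
  | cons x xs =>
    rw [List.pairwise_cons] at hp
    have hg := pvG_spec xs x hp.2 hp.1
    rw [List.foldl_cons, if_pos (by simp), List.nil_append,
      pvFoldl_dedup xs [x] x (by simp) (by simp)]
    constructor
    · rw [List.singleton_append, List.pairwise_cons]
      refine ⟨fun y hy => ?_, hg.1⟩
      have := (hg.2 y).mp hy
      exact lt_of_le_of_ne (hp.1 y this.1) (Ne.symm this.2)
    · intro y
      rw [List.singleton_append, List.mem_cons, hg.2, List.mem_cons]
      constructor
      · rintro (rfl | ⟨hy, _⟩)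
        · exact Or.inl rfl
        · exact Or.inr hy
      · rintro (rfl | hy)
        · exact Or.inl rfl
        · by_cases hyx : y = x
          · exact Or.inl hyx
          · exact Or.inr ⟨hy, hyx⟩

-- ===== VERDICT (by name: the statement is the Claim_ definition above) =====
theorem get_c1_spec : Claim_equal_get_c1 := by
  intro dataset _
  unfold Spec_get_c1 get_c1 get_c1_alt
  simp only []
  set LA := dataset.foldl (fun acc i => pvAInner acc i) [] with hLA
  set flat := dataset.foldl (fun acc t => acc ++ t) [] with hflat
  set s := PySem.List.sorted flat (fun x => x) false with hs
  have hsp : s.Pairwise (· ≤ ·) := PySem.List.sorted_pairwise flat (fun x => x)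
  have hB := pvB_spec s hsp
  set B := s.foldl (fun out x => if out = [] ∨ out.getLast? ≠ some x then out ++ [x] else out) []
    with hBdef
  have hmemflat : ∀ y, y ∈ flat ↔ ∃ row ∈ dataset, y ∈ row := by
    intro y; rw [hflat, pvFlatten]; simp [List.mem_flatten]
  have hmemB : ∀ y, y ∈ B ↔ ∃ row ∈ dataset, y ∈ row := by
    intro y
    rw [hB.2 y, hs, PySem.List.mem_sorted, hmemflat]
  have hmemLA : ∀ y, y ∈ LA ↔ ∃ row ∈ dataset, y ∈ row := by
    intro y; rw [hLA, pvALoop_mem]; simp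
  have hBnodup : B.Nodup := hB.1.imp ne_of_lt
  have hLAnodup : LA.Nodup := pvALoop_nodup dataset [] (by simp)
  have hperm : B.Perm LA := by
    rw [List.perm_ext_iff_of_nodup hBnodup hLAnodup]
    intro y; rw [hmemB, hmemLA]
  exact (PySem.List.sorted_eq_of_perm_of_pairwise_lt LA B (fun x => x) hperm hB.1)
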